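-- pv_equiv track=rewrite | github.com/ratati12/seti | Курсовая работа Матяша А.А. ККСО-01-19/src/nrz.py | get_x_coordinates_for_decoding
-- ===== SOURCE A (Python) =====
-- def get_x_coordinates_for_decoding(length):
--     sequence = []
--     step = 0
--     sequence.append(step)
--     for i in range(1, length, 2):
--         sequence.append(step)
--         step += 1
--         sequence.append(step)
--     return sequence
-- ===== SOURCE B (Python) =====
-- def get_x_coordinates_for_decoding(length):
--     n = 1 + 2 * max(0, length // 2)
--     return [j // 2 for j in range(n)]
-- ===== Notes on version B (the rewrite author's own statement) =====
-- stated objective: simpler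
-- what changed: Replaces the stateful loop that appends the step counter twice per iteration with a closed-form comprehension [j//2 for j in range(1+2*max(0,length//2))].
import Mathlib
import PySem

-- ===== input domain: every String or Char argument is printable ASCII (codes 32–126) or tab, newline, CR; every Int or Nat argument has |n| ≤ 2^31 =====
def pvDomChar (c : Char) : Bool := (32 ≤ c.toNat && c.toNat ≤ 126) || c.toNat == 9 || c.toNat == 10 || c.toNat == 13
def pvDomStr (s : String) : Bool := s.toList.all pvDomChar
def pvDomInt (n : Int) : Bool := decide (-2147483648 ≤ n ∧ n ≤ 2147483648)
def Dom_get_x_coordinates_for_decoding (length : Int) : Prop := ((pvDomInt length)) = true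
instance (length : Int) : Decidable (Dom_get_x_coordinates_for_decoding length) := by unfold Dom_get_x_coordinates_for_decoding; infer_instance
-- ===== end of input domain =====

-- B computes the same staircase by the closed form j // 2 over a range of the
-- right length, instead of A's stateful double-append loop (objective: simpler).

-- ===== PORT A =====
def get_x_coordinates_for_decoding (length : Int) : List Int :=
  -- sequence = []; step = 0; sequence.append(step)
  -- for i in range(1, length, 2): sequence.append(step); step += 1; sequence.append(step)
  let st := (PySem.List.pyRange 1 length 2).foldl
    (fun (st : List Int × Int) _ =>
      let seq := st.1 ++ [st.2]
      let step := st.2 + 1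
      (seq ++ [step], step)) ([0], 0)
  st.1

-- ===== PORT B =====
def get_x_coordinates_for_decoding_alt (length : Int) : List Int :=
  let n := 1 + 2 * max 0 (PySem.Int.floordiv length 2)
  (PySem.List.pyRange 0 n 1).map (fun j => PySem.Int.floordiv j 2)

-- ===== PRECONDITION & SPEC =====
def Spec_get_x_coordinates_for_decoding (length : Int) (out : List Int) : Prop := out = get_x_coordinates_for_decoding_alt length
instance (length : Int) (out : List Int) : Decidable (Spec_get_x_coordinates_for_decoding length out) := by unfold Spec_get_x_coordinates_for_decoding; infer_instance

-- ===== CLAIM (what is proved, stated in full; the proofs are below) =====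
def Claim_equal_get_x_coordinates_for_decoding : Prop := ∀ (length : Int), Dom_get_x_coordinates_for_decoding length → Spec_get_x_coordinates_for_decoding length (get_x_coordinates_for_decoding length)

-- ===== LEMMAS AND PROOFS =====

-- the tail A's loop produces after n iterations, starting from counter c
def pvTail (c : Int) : Nat → List Int
  | 0 => []
  | n + 1 => c :: (c + 1) :: pvTail (c + 1) n

theorem pvTail_snoc (c : Int) (n : Nat) :
    pvTail c (n + 1) = pvTail c n ++ [c + n, c + n + 1] := by
  induction n generalizing c with
  | zero => simp [pvTail]
  | succ m ih =>
    show c :: (c + 1) :: pvTail (c + 1) (m + 1) = _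
    rw [ih (c + 1)]
    simp [pvTail]
    ring

-- A's fold over any list of length n produces the seq/counter pair explicitly
theorem pvLoopA (l : List Int) (s : List Int) (c : Int) :
    l.foldl (fun (st : List Int × Int) _ =>
      let seq := st.1 ++ [st.2]
      let step := st.2 + 1
      (seq ++ [step], step)) (s, c)
    = (s ++ pvTail c l.length, c + l.length) := by
  induction l generalizing s c with
  | nil => simp [pvTail]
  | cons x xs ih =>
    simp only [List.foldl_cons, List.length_cons, ih]
    simp [pvTail]
    ring

-- B's closed form equals 0 :: pvTail 0 n when the range length is 1 + 2n
theorem pvClosedForm (n : Nat) :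
    List.map (fun j => PySem.Int.floordiv j 2)
      (List.map (fun k => (0 : Int) + (k : Nat)) (List.range (1 + 2 * n)))
      = 0 :: pvTail 0 n := by
  rw [List.map_map]
  induction n with
  | zero => simp [pvTail]
  | succ m ih =>
    have h1 : 1 + 2 * (m + 1) = (1 + 2 * m) + 1 + 1 := by ring
    rw [h1, List.range_succ, List.range_succ, List.map_append, List.map_append, ih, pvTail_snoc]
    have e1 : PySem.Int.floordiv ((0 : Int) + ((1 + 2 * m : Nat) : Int)) 2 = (0 : Int) + m := by
      rw [PySem.Int.floordiv_eq_ediv_of_pos (by norm_num : (0:Int) < 2)]; push_cast; omega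
    have e2 : PySem.Int.floordiv ((0 : Int) + (((1 + 2 * m) + 1 : Nat) : Int)) 2 = (0 : Int) + m + 1 := by
      rw [PySem.Int.floordiv_eq_ediv_of_pos (by norm_num : (0:Int) < 2)]; push_cast; omega
    simp only [List.map_cons, List.map_nil, Function.comp_apply, e1, e2]
    simp

-- ===== VERDICT (by name: the statement is the Claim_ definition above) =====
theorem get_x_coordinates_for_decoding_spec : Claim_equal_get_x_coordinates_for_decoding := by
  intro length _
  show get_x_coordinates_for_decoding length = get_x_coordinates_for_decoding_alt length
  unfold get_x_coordinates_for_decoding get_x_coordinates_for_decoding_alt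
  dsimp only
  rw [PySem.List.pyRange_of_pos 1 length (by norm_num)]
  rw [PySem.List.pyRange_one]
  simp only [pvLoopA, List.length_map, List.length_range]
  -- both sides are now about Nat counts; show they match
  have hc : (if 1 < length then ((length - 1 + 2 - 1) / 2).toNat else 0)
      = (max 0 (PySem.Int.floordiv length 2)).toNat := by
    rw [PySem.Int.floordiv_eq_ediv_of_pos (by norm_num : (0:Int) < 2)]
    split_ifs with h <;> omega
  rw [hc]
  have hn : (1 + 2 * max 0 (PySem.Int.floordiv length 2) - 0).toNat
      = 1 + 2 * (max 0 (PySem.Int.floordiv length 2)).toNat := by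
    rw [PySem.Int.floordiv_eq_ediv_of_pos (by norm_num : (0:Int) < 2)]
    omega
  rw [hn, pvClosedForm]
  simp
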